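-- pv_equiv track=rewrite | github.com/Ankitstrange/Steganography | Data_Secrecy.py | retriving_data
-- ===== SOURCE A (Python) =====
-- def retriving_data(ri5, entered_key):
--     ri6 = []
--     for i in range(len(ri5)):
--         a = int(ri5[i])
--         a = format(a, "b")
--         a = a[-1]
--         ri6.append(a)
--     ri6 = [ri6[n:n+10] for n in range(0, len(ri5), 10)]
--     ri7 = []
--     for i in range(len(ri6)):
--         a = ri6[i]
--         b = ''
--         for j in range(len(a)):
--             b = b + str(a[j])
--         if int(b, 2) == 1023:
--             break
--         ri7.append(b)
--     ri8 = []
--     for i in range(len(ri7)):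
--         a = ri7[i]
--         ri8.append(chr(int(a, 2)))
--     d = ''
--     for i in range(len(ri8)):
--         d = d + str(ri8[i])
--     if d[0:10] != entered_key:
--         d = "You have entered wrong key!"
--     else:
--         d = d[10:]
--     return d
-- ===== SOURCE B (Python) =====
-- def retriving_data(ri5, entered_key):
--     # pack all LSBs into one big integer, then decode 10-bit fields by arithmetic
--     N = 0
--     for x in ri5:
--         N = 2 * N + x % 2
--     out = []
--     pos = len(ri5)
--     while pos > 0:
--         w = 10 if pos >= 10 else pos
--         v = (N >> (pos - w)) % (1 << w)
--         if v == 1023: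
--             break
--         out.append(chr(v))
--         pos -= w
--     d = ''.join(out)
--     return d[10:] if d[:10] == entered_key else "You have entered wrong key!"
-- ===== Notes on version B (the rewrite author's own statement) =====
-- stated objective: alternative
-- what changed: A's four staged passes over intermediate lists of binary STRINGS (format(,'b')[-1] per element, index-range chunk list, break-scan re-concatenating each chunk, chr-map and join) are replaced by a different data structure: all LSBs are packed into ONE big integer, from which the 10-bit fields are extracted back by shifts and modular arithmetic (v = (N >> (pos-w)) % (1 << w)).
import Mathlib
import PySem

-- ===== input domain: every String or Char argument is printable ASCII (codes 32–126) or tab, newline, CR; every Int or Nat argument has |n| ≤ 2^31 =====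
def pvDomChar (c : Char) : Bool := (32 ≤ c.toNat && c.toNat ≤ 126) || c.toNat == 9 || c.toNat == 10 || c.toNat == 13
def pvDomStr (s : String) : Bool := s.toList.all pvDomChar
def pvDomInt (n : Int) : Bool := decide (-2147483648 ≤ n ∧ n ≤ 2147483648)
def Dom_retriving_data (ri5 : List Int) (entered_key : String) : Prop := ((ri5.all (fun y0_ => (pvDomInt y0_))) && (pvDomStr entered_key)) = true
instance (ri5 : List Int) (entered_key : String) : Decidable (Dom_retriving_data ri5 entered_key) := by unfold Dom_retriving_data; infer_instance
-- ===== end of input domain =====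

-- B replaces A's staged string pipeline (per-element binary strings, chunk lists,
-- break-scan, chr-join) by a different data structure: all LSBs are packed into ONE
-- big integer and the 10-bit fields are extracted back by shifts and modular
-- arithmetic; objective: alternative (a different data structure, not a speed claim).

-- ===== PORT A =====

-- binary digits of a natural number, most-significant first ('' for 0); exact on Nat
def pvBinNat (n : Nat) : List Char :=
  if h : n = 0 then []
  else pvBinNat (n / 2) ++ [if n % 2 = 1 then '1' else '0']
decreasing_by exact Nat.div_lt_self (Nat.pos_of_ne_zero h) one_lt_two

-- format(a, "b"): '-' sign followed by binary of |a|; '0' for 0 (exact)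
def pvFormatB (a : Int) : List Char :=
  if a = 0 then ['0']
  else (if a < 0 then ['-'] else []) ++ pvBinNat a.natAbs

-- int(b, 2) on a string of '0'/'1' digits (exact there; A only calls it on nonempty digit strings)
def pvParseBin (b : List Char) : Nat :=
  b.foldl (fun acc c => 2 * acc + (if c = '1' then 1 else 0)) 0

-- A's second loop with its break: rebuild b character by character, stop on 1023
def pvLoop2 (l : List (List Char)) : List (List Char) :=
  match l with
  | [] => []
  | a :: rest =>
    let b := a.foldl (fun acc c => acc ++ [c]) []
    if pvParseBin b = 1023 then [] else b :: pvLoop2 rest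

def retriving_data (ri5 : List Int) (entered_key : String) : String :=
  -- a[-1] via pyGet? (-1); format never returns '' so the getD '0' default is never used
  let ri6 : List Char :=
    ri5.foldl (fun acc a => acc ++ [(PySem.List.pyGet? (pvFormatB a) (-1)).getD '0']) []
  let ri6c : List (List Char) :=
    (PySem.List.pyRange 0 ri5.length 10).map
      (fun n => PySem.List.slice ri6 (some n) (some (n + 10)))
  let ri7 := pvLoop2 ri6c
  let ri8 : List Char := ri7.foldl (fun acc b => acc ++ [Char.ofNat (pvParseBin b)]) []
  let d : List Char := ri8.foldl (fun acc c => acc ++ [c]) []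
  if PySem.List.slice d (some 0) (some 10) ≠ entered_key.toList
  then "You have entered wrong key!"
  else String.ofList (PySem.List.slice d (some 10) none)

-- ===== PORT B =====

-- Source B's while loop: pos bits of N remain; read the top w = min(10, pos) of them
-- as v = (N >> (pos-w)) % (1 << w), stop on the all-ones sentinel, else emit chr(v)
def pvExtract (N : Int) (pos : Nat) : List Char :=
  if h : pos = 0 then []
  else
    let w : Nat := if pos ≥ 10 then 10 else pos
    let v : Int := PySem.Int.mod (N >>> (pos - w)) ((1 : Int) <<< w)
    if v = 1023 then []
    else Char.ofNat v.toNat :: pvExtract N (pos - w)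
termination_by pos
decreasing_by
  split <;> omega

def retriving_data_alt (ri5 : List Int) (entered_key : String) : String :=
  let N : Int := ri5.foldl (fun N x => 2 * N + PySem.Int.mod x 2) 0
  let d : List Char := pvExtract N ri5.length
  if d.take 10 = entered_key.toList
  then String.ofList (d.drop 10)
  else "You have entered wrong key!"

-- ===== PRECONDITION & SPEC =====
def Spec_retriving_data (ri5 : List Int) (entered_key : String) (out : String) : Prop := out = retriving_data_alt ri5 entered_key
instance (ri5 : List Int) (entered_key : String) (out : String) : Decidable (Spec_retriving_data ri5 entered_key out) := by unfold Spec_retriving_data; infer_instance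

-- ===== CLAIM (what is proved, stated in full; the proofs are below) =====
def Claim_equal_retriving_data : Prop := ∀ (ri5 : List Int) (entered_key : String), Dom_retriving_data ri5 entered_key → Spec_retriving_data ri5 entered_key (retriving_data ri5 entered_key)

-- ===== LEMMAS AND PROOFS =====

-- proof-only: A's break-scan phrased as a recursion on the remaining suffix of ri5
def pvChunkLoop (xs : List Int) : List Char :=
  if h : xs = [] then []
  else
    let bits : List Char := (xs.take 10).map (fun x => if PySem.Int.mod x 2 = 1 then '1' else '0')
    if pvParseBin bits = 1023 then []
    else Char.ofNat (pvParseBin bits) :: pvChunkLoop (xs.drop 10)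
termination_by xs.length
decreasing_by
  have := List.length_pos_iff.mpr h
  simp [List.length_drop]; omega

-- the chunk shape shared by both sides
def pvChunks (xs : List Char) : List (List Char) :=
  if h : xs = [] then []
  else xs.take 10 :: pvChunks (xs.drop 10)
termination_by xs.length
decreasing_by
  have := List.length_pos_iff.mpr h
  simp [List.length_drop]; omega

theorem pvBinNat_ne_nil {n : Nat} (h : n ≠ 0) : pvBinNat n ≠ [] := by
  rw [pvBinNat]; simp [h]

theorem pvBinNat_getLast? {n : Nat} (h : n ≠ 0) :
    (pvBinNat n).getLast? = some (if n % 2 = 1 then '1' else '0') := by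
  rw [pvBinNat]; simp [h]

@[simp] theorem pvLastDig (a : Int) :
    (PySem.List.pyGet? (pvFormatB a) (-1)).getD '0'
      = (if PySem.Int.mod a 2 = 1 then '1' else '0') := by
  rw [PySem.List.pyGet?_neg_one, PySem.Int.mod_eq_emod_of_pos (by norm_num)]
  by_cases h : a = 0
  · subst h; decide
  · have hn : a.natAbs ≠ 0 := by simpa using h
    unfold pvFormatB
    rw [if_neg h, List.getLast?_append_of_ne_nil _ (pvBinNat_ne_nil hn),
      pvBinNat_getLast? hn]
    have : a.natAbs % 2 = 1 ↔ a % 2 = 1 := by omega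
    simp only [Option.getD_some]
    by_cases h2 : a % 2 = 1 <;> simp [h2, this]

-- the pyRange/slice chunking of A equals the take/drop chunking
theorem pvChunks_range (m : Nat) (xs : List Char) (h : m = (xs.length + 9) / 10) :
    (List.range m).map (fun k => (xs.drop (10 * k)).take 10) = pvChunks xs := by
  induction m generalizing xs with
  | zero =>
    have hx : xs = [] := List.length_eq_zero_iff.mp (by omega)
    subst hx; rw [pvChunks.eq_def]; simp
  | succ m ih =>
    have hne : xs ≠ [] := by
      intro hx; subst hx; simp at h
    have hlen : 0 < xs.length := List.length_pos_iff.mpr hne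
    rw [pvChunks.eq_def, dif_neg hne, List.range_succ_eq_map]
    simp only [List.map_cons, List.map_map, Nat.mul_zero, List.drop_zero]
    congr 1
    have step : ∀ k : Nat, ((fun k => (xs.drop (10 * k)).take 10) ∘ Nat.succ) k
        = (fun k => ((xs.drop 10).drop (10 * k)).take 10) k := by
      intro k
      simp only [Function.comp]
      rw [List.drop_drop]
      congr 2
      omega
    rw [List.map_congr_left (fun k _ => step k)]
    apply ih
    simp only [List.length_drop]
    omega

-- the LSB of x as a natural number (0 or 1)
def pvBit (x : Int) : Nat := (PySem.Int.mod x 2).toNat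

-- the packed value of the LSBs of xs, in Nat
def pvPackN (a : Nat) (xs : List Int) : Nat :=
  xs.foldl (fun a x => 2 * a + pvBit x) a

theorem pvBit_lt (x : Int) : pvBit x < 2 := by
  have h1 := PySem.Int.mod_nonneg x (b := 2) (by norm_num)
  have h2 := PySem.Int.mod_lt x (b := 2) (by norm_num)
  unfold pvBit; omega

theorem pvPackN_shift (xs : List Int) (a : Nat) :
    pvPackN a xs = a * 2 ^ xs.length + pvPackN 0 xs := by
  induction xs generalizing a with
  | nil => simp [pvPackN]
  | cons x t ih =>
    simp only [pvPackN, List.foldl_cons, List.length_cons] at *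
    rw [ih (2 * a + pvBit x), ih (2 * 0 + pvBit x)]
    ring

theorem pvPackN_lt (xs : List Int) : pvPackN 0 xs < 2 ^ xs.length := by
  induction xs with
  | nil => simp [pvPackN]
  | cons x t ih =>
    have hb := pvBit_lt x
    have h1 : pvPackN 0 (x :: t) = pvPackN (2 * 0 + pvBit x) t := rfl
    rw [h1, pvPackN_shift]
    have h2 : 2 ^ (List.length (x :: t)) = 2 * 2 ^ t.length := by
      rw [List.length_cons]; ring
    rw [h2]
    have : pvBit x = 0 ∨ pvBit x = 1 := by omega
    rcases this with h | h <;> rw [h] <;> omega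

theorem pvPackN_append (u v : List Int) :
    pvPackN 0 (u ++ v) = pvPackN 0 u * 2 ^ v.length + pvPackN 0 v := by
  unfold pvPackN
  rw [List.foldl_append]
  exact pvPackN_shift v _

-- A's per-chunk string parse equals the packed value of the chunk
theorem pvParseBin_map (xs : List Int) :
    pvParseBin (xs.map (fun x => if PySem.Int.mod x 2 = 1 then '1' else '0')) = pvPackN 0 xs := by
  unfold pvParseBin pvPackN
  rw [List.foldl_map]
  congr 1
  funext a x
  have hb := pvBit_lt x
  have h1 := PySem.Int.mod_nonneg x (b := 2) (by norm_num)
  by_cases h : PySem.Int.mod x 2 = 1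
  · have hx : pvBit x = 1 := by unfold pvBit; omega
    rw [if_pos h, hx, if_pos rfl]
  · have hx : pvBit x = 0 := by
      have h2 := PySem.Int.mod_lt x (b := 2) (by norm_num)
      unfold pvBit; omega
    rw [if_neg h, hx, if_neg (by decide)]

-- B's Int packing fold equals the Nat packed value
theorem pvPack_int (xs : List Int) (a : Nat) :
    xs.foldl (fun N x => 2 * N + PySem.Int.mod x 2) (a : Int) = (pvPackN a xs : Int) := by
  induction xs generalizing a with
  | nil => simp [pvPackN]
  | cons x t ih =>
    simp only [List.foldl_cons, pvPackN]
    have hm : (2 * (a : Int) + PySem.Int.mod x 2) = ((2 * a + pvBit x : Nat) : Int) := by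
      have h1 := PySem.Int.mod_nonneg x (b := 2) (by norm_num)
      unfold pvBit; push_cast; omega
    rw [hm, ih]
    rfl

-- B's extraction loop on Nat values
def pvExtractN (N : Nat) (pos : Nat) : List Char :=
  if h : pos = 0 then []
  else
    let w : Nat := if pos ≥ 10 then 10 else pos
    let v : Nat := (N / 2 ^ (pos - w)) % 2 ^ w
    if v = 1023 then []
    else Char.ofNat v :: pvExtractN N (pos - w)
termination_by pos
decreasing_by
  split <;> omega

theorem pvExtract_natCast (m : Nat) (pos : Nat) :
    pvExtract (m : Int) pos = pvExtractN m pos := by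
  induction pos using Nat.strong_induction_on with
  | _ pos ih =>
    rw [pvExtract.eq_def, pvExtractN.eq_def]
    by_cases h : pos = 0
    · simp [h]
    · rw [dif_neg h, dif_neg h]
      set q : Nat := if pos ≥ 10 then 10 else pos with hq
      show (if PySem.Int.mod ((m : Int) >>> (pos - q)) ((1 : Int) <<< q) = 1023 then ([] : List Char)
            else Char.ofNat (PySem.Int.mod ((m : Int) >>> (pos - q)) ((1 : Int) <<< q)).toNat
              :: pvExtract (m : Int) (pos - q))
          = (if (m / 2 ^ (pos - q)) % 2 ^ q = 1023 then ([] : List Char)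
            else Char.ofNat ((m / 2 ^ (pos - q)) % 2 ^ q) :: pvExtractN m (pos - q))
      have hshift : ((m : Int) >>> (pos - q)) = ((m >>> (pos - q) : Nat) : Int) := by
        simp [Int.shiftRight_eq_div_pow, Nat.shiftRight_eq_div_pow]
      have hone : ((1 : Int) <<< q) = (((1 <<< q : Nat)) : Int) := by
        simp [Int.shiftLeft_eq, Nat.shiftLeft_eq]
      rw [hshift, hone, PySem.Int.mod_natCast]
      simp only [Nat.shiftRight_eq_div_pow, Nat.shiftLeft_eq, Nat.one_mul]
      by_cases hv : (m / 2 ^ (pos - q)) % 2 ^ q = 1023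
      · have hv' : (((m / 2 ^ (pos - q)) % 2 ^ q : Nat) : Int) = (1023 : Int) := by
          exact_mod_cast hv
        rw [if_pos hv', if_pos hv]
      · have hv' : (((m / 2 ^ (pos - q)) % 2 ^ q : Nat) : Int) ≠ (1023 : Int) := by
          exact_mod_cast hv
        rw [if_neg hv', if_neg hv, Int.toNat_natCast]
        have hw : q ≥ 1 := by rw [hq]; split <;> omega
        congr 1
        exact ih _ (by omega)

-- the key lemma: the arithmetic extraction of the packed integer is A's break-scan
theorem pvExtractN_eq (xs : List Int) (M : Nat) :
    pvExtractN (M * 2 ^ xs.length + pvPackN 0 xs) xs.length = pvChunkLoop xs := by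
  generalize hn : xs.length = n
  induction n using Nat.strong_induction_on generalizing xs M with
  | _ n ih =>
    by_cases h : xs = []
    · subst h
      simp only [List.length_nil] at hn
      rw [pvExtractN.eq_def, pvChunkLoop.eq_def]
      simp [← hn]
    · have hlen : 0 < n := by
        have := List.length_pos_iff.mpr h
        omega
      have hw1 : 1 ≤ (if n ≥ 10 then 10 else n) := by split <;> omega
      have hwn : (if n ≥ 10 then 10 else n) ≤ n := by split <;> omega
      set w : Nat := if n ≥ 10 then 10 else n with hw
      -- chunk = take w, rest = drop w
      have htake : xs.take 10 = xs.take w := by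
        rw [hw]; split
        · rfl
        · rw [List.take_of_length_le (by omega), List.take_of_length_le (by omega)]
      have hdrop : xs.drop 10 = xs.drop w := by
        rw [hw]; split
        · rfl
        · rw [List.drop_eq_nil_of_le (by omega), List.drop_eq_nil_of_le (by omega)]
      have hsplit : xs = xs.take w ++ xs.drop w := (List.take_append_drop w xs).symm
      have hlu : (xs.take w).length = w := by
        rw [List.length_take]; omega
      have hlv : (xs.drop w).length = n - w := by
        rw [List.length_drop]; omega
      have hpack : pvPackN 0 xs
          = pvPackN 0 (xs.take w) * 2 ^ (n - w) + pvPackN 0 (xs.drop w) := by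
        conv_lhs => rw [hsplit]
        rw [pvPackN_append, hlv]
      have halt : pvPackN 0 (xs.take w) < 2 ^ w := by
        have := pvPackN_lt (xs.take w); rwa [hlu] at this
      have hblt : pvPackN 0 (xs.drop w) < 2 ^ (n - w) := by
        have := pvPackN_lt (xs.drop w); rwa [hlv] at this
      have hpow : 2 ^ n = 2 ^ w * 2 ^ (n - w) := by
        rw [← pow_add]; congr 1; omega
      have hNval : M * 2 ^ n + pvPackN 0 xs
          = 2 ^ (n - w) * (M * 2 ^ w + pvPackN 0 (xs.take w)) + pvPackN 0 (xs.drop w) := by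
        rw [hpack, hpow]; ring
      -- the extracted field is exactly the packed value of the chunk
      have hfield : (M * 2 ^ n + pvPackN 0 xs) / 2 ^ (n - w) % 2 ^ w
          = pvPackN 0 (xs.take w) := by
        rw [hNval, Nat.mul_add_div (Nat.pow_pos (by norm_num)),
          Nat.div_eq_of_lt hblt, Nat.add_zero,
          Nat.add_comm (M * 2 ^ w) (pvPackN 0 (xs.take w)),
          Nat.add_mul_mod_self_right, Nat.mod_eq_of_lt halt]
      rw [pvChunkLoop.eq_def, dif_neg h, pvExtractN.eq_def, dif_neg (by omega : ¬ n = 0)]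
      show (if (M * 2 ^ n + pvPackN 0 xs) / 2 ^ (n - w) % 2 ^ w = 1023 then ([] : List Char)
            else Char.ofNat ((M * 2 ^ n + pvPackN 0 xs) / 2 ^ (n - w) % 2 ^ w)
              :: pvExtractN (M * 2 ^ n + pvPackN 0 xs) (n - w))
          = (if pvParseBin ((xs.take 10).map
                (fun x => if PySem.Int.mod x 2 = 1 then '1' else '0')) = 1023 then ([] : List Char)
            else Char.ofNat (pvParseBin ((xs.take 10).map
                (fun x => if PySem.Int.mod x 2 = 1 then '1' else '0'))) :: pvChunkLoop (xs.drop 10))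
      rw [hfield, htake, pvParseBin_map]
      by_cases hv : pvPackN 0 (xs.take w) = 1023
      · rw [if_pos hv, if_pos hv]
      · rw [if_neg hv, if_neg hv, hdrop]
        congr 1
        have hrec : M * 2 ^ n + pvPackN 0 xs
            = (M * 2 ^ w + pvPackN 0 (xs.take w)) * 2 ^ (n - w)
              + pvPackN 0 (xs.drop w) := by
          rw [hNval]; ring
        rw [hrec]
        exact ih (n - w) (by omega) (xs.drop w) _ hlv

theorem pv_main (ri5 : List Int) (entered_key : String) :
    retriving_data ri5 entered_key = retriving_data_alt ri5 entered_key := by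
  unfold retriving_data retriving_data_alt
  -- collapse A's appending folds into maps / identity
  simp only [PySem.List.foldl_append_singleton_eq_map, List.nil_append, List.map_id_fun']
  -- rewrite A's pyRange/slice chunking into take/drop chunks
  have hr : (PySem.List.pyRange 0 ri5.length 10).map
      (fun n => PySem.List.slice
        (ri5.map (fun a => (PySem.List.pyGet? (pvFormatB a) (-1)).getD '0')) (some n) (some (n + 10)))
      = pvChunks (ri5.map (fun a => (PySem.List.pyGet? (pvFormatB a) (-1)).getD '0')) := by
    set ys := ri5.map (fun a => (PySem.List.pyGet? (pvFormatB a) (-1)).getD '0') with hys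
    have hlen : (ri5.length : Int) = (ys.length : Int) := by simp [hys]
    rw [hlen, PySem.List.pyRange_of_pos _ _ (by norm_num), List.map_map]
    have hcnt : (if (0:Int) < (ys.length : Int)
          then (((ys.length : Int) - 0 + 10 - 1) / 10).toNat else 0)
        = (ys.length + 9) / 10 := by
      rcases Nat.eq_zero_or_pos ys.length with h0 | h0
      · rw [h0]; norm_num
      · have hp : (0:Int) < (ys.length : Int) := by exact_mod_cast h0
        rw [if_pos hp]
        have h9 : ((ys.length : Int) - 0 + 10 - 1) = ((ys.length + 9 : Nat) : Int) := by
          push_cast; ring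
        rw [h9]
        omega
    rw [hcnt, ← pvChunks_range ((ys.length + 9) / 10) ys rfl]
    apply List.map_congr_left
    intro k _
    simp only [Function.comp]
    rw [PySem.List.slice_toNat ys (by positivity) (by positivity)]
    have e1 : ((0 : Int) + 10 * (k:Int) + 10).toNat - ((0 : Int) + 10 * (k:Int)).toNat = 10 := by
      omega
    have e2 : ((0 : Int) + 10 * (k:Int)).toNat = 10 * k := by omega
    rw [e1, e2]
  rw [hr]
  -- A's pipeline tail is pvChunkLoop
  have hA : (pvLoop2 (pvChunks (ri5.map (fun a => (PySem.List.pyGet? (pvFormatB a) (-1)).getD '0')))).map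
      (fun b => Char.ofNat (pvParseBin b)) = pvChunkLoop ri5 := by
    generalize hl : ri5.length = n
    clear hr
    induction n using Nat.strong_induction_on generalizing ri5 with
    | _ n ih =>
      by_cases h : ri5 = []
      · subst h
        rw [pvChunkLoop.eq_def, pvChunks.eq_def]
        simp [pvLoop2]
      · have hm : ri5.map (fun a => (PySem.List.pyGet? (pvFormatB a) (-1)).getD '0') ≠ [] := by
          simpa using h
        rw [pvChunkLoop.eq_def, dif_neg h, pvChunks.eq_def, dif_neg hm,
          ← List.map_take, ← List.map_drop]
        simp only [pvLoop2, PySem.List.foldl_append_singleton, List.nil_append, pvLastDig]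
        by_cases h1023 :
            pvParseBin ((ri5.take 10).map (fun x => if PySem.Int.mod x 2 = 1 then '1' else '0')) = 1023
        · rw [if_pos h1023, if_pos h1023]; rfl
        · rw [if_neg h1023, if_neg h1023]
          simp only [List.map_cons]
          congr 1
          have hlt : (ri5.drop 10).length < n := by
            have := List.length_pos_iff.mpr h
            simp only [List.length_drop]
            omega
          have hf : (fun a : Int => (PySem.List.pyGet? (pvFormatB a) (-1)).getD '0')
              = fun x : Int => if PySem.Int.mod x 2 = 1 then '1' else '0' := funext pvLastDig
          rw [← hf]
          exact ih _ hlt _ rfl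
  rw [hA]
  -- B's packed-integer extraction is also pvChunkLoop
  have hB : pvExtract (ri5.foldl (fun N x => 2 * N + PySem.Int.mod x 2) 0) ri5.length
      = pvChunkLoop ri5 := by
    have h0 : (0 : Int) = ((0 : Nat) : Int) := rfl
    rw [h0, pvPack_int, pvExtract_natCast]
    have : pvPackN 0 ri5 = 0 * 2 ^ ri5.length + pvPackN 0 ri5 := by omega
    rw [this, pvExtractN_eq]
  rw [hB]
  -- the final key check: A's slices are take/drop of the decoded characters
  rw [PySem.List.slice_zero_start, PySem.List.slice_to _ (by norm_num),
    PySem.List.slice_from _ (by norm_num)]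
  norm_num
  by_cases hk : (pvChunkLoop ri5).take 10 = entered_key.toList
  · simp [hk]
  · simp [hk]

-- ===== VERDICT (by name: the statement is the Claim_ definition above) =====
theorem retriving_data_spec : Claim_equal_retriving_data := by
  intro ri5 entered_key _
  unfold Spec_retriving_data
  exact pv_main ri5 entered_key
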